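-- pv_equiv track=rewrite | github.com/pypi-data/pypi-mirror-396 | packages/helmkit/helmkit-0.7.0-py3-none-any.whl/helmkit/molecule.py | _parse_rna_string
-- ===== SOURCE A (Python) =====
-- from typing import List
--
-- def _parse_rna_string(sequence: str) -> List[str]:
--     result = []
--     current = ""
--     bracket_depth = 0
--
--     for char in sequence:
--         if char in "[(":
--             bracket_depth += 1
--             current += char
--         elif char in "])":
--             bracket_depth -= 1
--             current += char
--         else:
--             current += char
--         if bracket_depth == 0:
--             result.append(current)
--             current = ""
--
--     if current:
--         result.append(current)
--
--     result = [
--         r[1:-1] if r.startswith("[") and r.endswith("]") else r for r in result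
--     ]
--     return result
-- ===== SOURCE B (Python) =====
-- from typing import List
--
-- def _parse_rna_string(sequence: str) -> List[str]:
--     # One pass computes the boundary indices where bracket depth returns to 0;
--     # tokens are then slices of the original string between consecutive boundaries.
--     bounds = []
--     depth = 0
--     for i, ch in enumerate(sequence):
--         if ch in "[(":
--             depth += 1
--         elif ch in "])":
--             depth -= 1
--         if depth == 0:
--             bounds.append(i + 1)
--     starts = [0] + bounds
--     last = bounds[-1] if bounds else 0
--     ends = bounds + ([len(sequence)] if last < len(sequence) else [])
--     raw = [sequence[a:b] for a, b in zip(starts, ends)]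
--     return [r[1:-1] if r.startswith("[") and r.endswith("]") else r for r in raw]
-- ===== Notes on version B (the rewrite author's own statement) =====
-- stated objective: alternative
-- what changed: Replaces A's running string accumulator (append char by char, flush at depth 0) by a scan that only records the indices where bracket depth returns to 0 and then slices the original string between consecutive boundaries.
import Mathlib
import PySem

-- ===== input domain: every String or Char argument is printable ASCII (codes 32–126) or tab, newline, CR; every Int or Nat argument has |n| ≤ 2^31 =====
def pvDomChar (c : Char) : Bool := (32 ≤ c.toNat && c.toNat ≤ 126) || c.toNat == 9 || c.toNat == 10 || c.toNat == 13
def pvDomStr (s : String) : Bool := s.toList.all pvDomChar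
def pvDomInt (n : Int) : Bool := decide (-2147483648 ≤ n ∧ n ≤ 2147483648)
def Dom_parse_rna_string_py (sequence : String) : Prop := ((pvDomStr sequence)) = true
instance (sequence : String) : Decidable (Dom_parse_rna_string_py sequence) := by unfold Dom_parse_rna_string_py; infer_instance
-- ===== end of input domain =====

-- B replaces A's running string accumulator by one scan that records the depth-0 boundary
-- indices and then slices the original sequence between consecutive boundaries (alternative
-- decomposition, same cost).

-- shared by both ports: the depth update `if char in "[(" … elif char in "])" …`
def pvDep (d : Int) (c : Char) : Int :=
  if c = '[' ∨ c = '(' then d + 1 else if c = ']' ∨ c = ')' then d - 1 else d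

-- the final comprehension, identical in both Pythons: r[1:-1] if r.startswith("[") and r.endswith("]") else r
def pvStripTok (r : List Char) : List Char :=
  if PySem.Chars.startswith r ['['] && PySem.Chars.endswith r [']'] then
    PySem.List.slice r (some 1) (some (-1))
  else r

-- ===== PORT A =====
-- loop body: update depth, extend current, flush when depth == 0
def pvAstep (st : List (List Char) × List Char × Int) (c : Char) :
    List (List Char) × List Char × Int :=
  let d := pvDep st.2.2 c
  let cur := st.2.1 ++ [c]
  if d = 0 then (st.1 ++ [cur], [], d) else (st.1, cur, d)

def parse_rna_string_py (sequence : String) : List String :=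
  let st := sequence.toList.foldl pvAstep ([], [], 0)
  let res := if st.2.1 ≠ [] then st.1 ++ [st.2.1] else st.1
  res.map (fun r => String.ofList (pvStripTok r))

-- ===== PORT B =====
-- loop body: update depth, record boundary index i+1 when depth == 0
def pvBstep (st : List Int × Int) (p : Int × Char) : List Int × Int :=
  let d := pvDep st.2 p.2
  if d = 0 then (st.1 ++ [p.1 + 1], d) else (st.1, d)

def parse_rna_string_py_alt (sequence : String) : List String :=
  let cs := sequence.toList
  let bounds := ((PySem.List.enumerate cs 0).foldl pvBstep ([], 0)).1
  let starts : List Int := 0 :: bounds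
  let last : Int := (PySem.List.pyGet? bounds (-1)).getD 0      -- bounds[-1] if bounds else 0
  let ends : List Int := bounds ++ (if last < PySem.List.len cs then [PySem.List.len cs] else [])
  let raw := (starts.zip ends).map (fun ab => PySem.List.slice cs (some ab.1) (some ab.2))
  raw.map (fun r => String.ofList (pvStripTok r))

-- ===== PRECONDITION & SPEC =====
def Spec_parse_rna_string_py (sequence : String) (out : List String) : Prop := out = parse_rna_string_py_alt sequence
instance (sequence : String) (out : List String) : Decidable (Spec_parse_rna_string_py sequence out) := by unfold Spec_parse_rna_string_py; infer_instance

-- ===== CLAIM (what is proved, stated in full; the proofs are below) =====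
def Claim_equal_parse_rna_string_py : Prop := ∀ (sequence : String), Dom_parse_rna_string_py sequence → Spec_parse_rna_string_py sequence (parse_rna_string_py sequence)

-- ===== LEMMAS AND PROOFS =====

-- tokenizer characterizing A's loop: tokens flushed so far, pending chars, depth
def pvTok : List Char → List Char → Int → List (List Char) × List Char × Int
  | [], cur, d => ([], cur, d)
  | c :: cs, cur, d =>
    let d' := pvDep d c
    if d' = 0 then
      let r := pvTok cs [] d'
      ((cur ++ [c]) :: r.1, r.2)
    else pvTok cs (cur ++ [c]) d'

-- cumulative end indices of a token list starting at offset o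
def pvCum : Int → List (List Char) → List Int
  | _, [] => []
  | o, t :: ts => (o + (t.length : Int)) :: pvCum (o + (t.length : Int)) ts

-- boundary indices recorded by B's loop
def pvBounds : List Char → Int → Int → List Int
  | [], _, _ => []
  | c :: cs, k, d =>
    let d' := pvDep d c
    if d' = 0 then (k + 1) :: pvBounds cs (k + 1) d' else pvBounds cs (k + 1) d'

theorem pvA_fold (cs : List Char) : ∀ (res : List (List Char)) (cur : List Char) (d : Int),
    cs.foldl pvAstep (res, cur, d) =
      ((res ++ (pvTok cs cur d).1, (pvTok cs cur d).2)) := by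
  induction cs with
  | nil => intro res cur d; simp [pvTok]
  | cons c cs ih =>
    intro res cur d
    simp only [List.foldl_cons, pvAstep, pvTok]
    by_cases h : pvDep d c = 0 <;> simp [h, ih]

theorem pvB_fold (cs : List Char) : ∀ (bnds : List Int) (d k : Int),
    ((PySem.List.enumerate cs k).foldl pvBstep (bnds, d)).1 = bnds ++ pvBounds cs k d := by
  induction cs with
  | nil => intro bnds d k; simp [PySem.List.enumerate_nil, pvBounds]
  | cons c cs ih =>
    intro bnds d k
    rw [PySem.List.enumerate_cons]
    simp only [List.foldl_cons, pvBstep, pvBounds]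
    by_cases h : pvDep d c = 0 <;> simp [h, ih]

theorem pvBounds_eq_cum (cs : List Char) : ∀ (cur : List Char) (d k : Int),
    pvBounds cs k d = pvCum (k - (cur.length : Int)) (pvTok cs cur d).1 := by
  induction cs with
  | nil => intro cur d k; simp [pvBounds, pvTok, pvCum]
  | cons c cs ih =>
    intro cur d k
    simp only [pvBounds, pvTok]
    by_cases h : pvDep d c = 0
    · rw [if_pos h, if_pos h]
      simp only [pvCum]
      congr 1
      · simp only [List.length_append, List.length_cons, List.length_nil]
        push_cast; ring
      · rw [ih [] _ (k + 1)]
        congr 1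
        simp only [List.length_append, List.length_cons, List.length_nil]
        push_cast; ring
    · rw [if_neg h, if_neg h, ih (cur ++ [c]) _ (k + 1)]
      congr 1
      simp only [List.length_append, List.length_cons, List.length_nil]
      push_cast; ring

theorem pvTok_flatten (cs : List Char) : ∀ (cur : List Char) (d : Int),
    (pvTok cs cur d).1.flatten ++ (pvTok cs cur d).2.1 = cur ++ cs := by
  induction cs with
  | nil => intro cur d; simp [pvTok]
  | cons c cs ih =>
    intro cur d
    simp only [pvTok]
    by_cases h : pvDep d c = 0
    · rw [if_pos h]
      simp only [List.flatten_cons, List.append_assoc]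
      rw [ih []]
      simp
    · rw [if_neg h, ih (cur ++ [c]) _]
      simp

theorem pvTok_ne_nil (cs : List Char) : ∀ (cur : List Char) (d : Int),
    ∀ t ∈ (pvTok cs cur d).1, t ≠ [] := by
  induction cs with
  | nil => intro cur d; simp [pvTok]
  | cons c cs ih =>
    intro cur d t ht
    simp only [pvTok] at ht
    by_cases h : pvDep d c = 0
    · rw [if_pos h] at ht
      rcases List.mem_cons.mp ht with h1 | h1
      · subst h1; simp
      · exact ih [] _ t h1
    · rw [if_neg h] at ht
      exact ih (cur ++ [c]) _ t ht

theorem pvGetLastD_cons (a : Int) (l : List Int) (x : Int) :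
    ((a :: l).getLast?).getD x = (l.getLast?).getD a := by
  cases l with
  | nil => simp
  | cons b m =>
    rw [List.getLast?_cons_cons]
    cases hy : (b :: m).getLast? with
    | none => rw [List.getLast?_eq_none_iff] at hy; exact absurd hy (by simp)
    | some y => rfl

theorem pvCum_getLast (toks : List (List Char)) : ∀ (o : Int),
    ((pvCum o toks).getLast?).getD o = o + (toks.flatten.length : Int) := by
  induction toks with
  | nil => intro o; simp [pvCum]
  | cons t ts ih =>
    intro o
    simp only [pvCum, List.flatten_cons]
    rw [pvGetLastD_cons, ih (o + (t.length : Int))]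
    simp only [List.length_append]
    push_cast; ring

theorem pvSlices (toks : List (List Char)) :
    ∀ (pre rest cs : List Char) (E : List Int),
    cs = pre ++ toks.flatten ++ rest →
    (∀ t ∈ toks, t ≠ []) →
    E = (if rest = [] then [] else [(cs.length : Int)]) →
    ((((pre.length : Int) :: pvCum (pre.length : Int) toks).zip
        (pvCum (pre.length : Int) toks ++ E)).map
      (fun ab => PySem.List.slice cs (some ab.1) (some ab.2)))
      = toks ++ (if rest = [] then [] else [rest]) := by
  induction toks with
  | nil =>
    intro pre rest cs E hcs _ hE
    by_cases hr : rest = []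
    · simp [pvCum, hE, hr]
    · subst hE hcs
      simp only [List.flatten_nil, List.append_nil, if_neg hr, pvCum, List.nil_append,
        List.zip_cons_cons, List.zip_nil_left, List.map_cons, List.map_nil]
      rw [PySem.List.slice_natCast]
      congr 1
      rw [List.drop_left]
      rw [List.take_of_length_le (by simp)]
  | cons t ts ih =>
    intro pre rest cs E hcs hne hE
    simp only [pvCum, List.flatten_cons] at hcs ⊢
    have hcast : (pre.length : Int) + (t.length : Int) = (((pre ++ t).length : Nat) : Int) := by
      simp only [List.length_append]; push_cast; ring
    rw [hcast]
    simp only [List.cons_append, List.zip_cons_cons, List.map_cons]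
    have h1 : PySem.List.slice cs (some (pre.length : Int)) (some (((pre ++ t).length : Nat) : Int)) = t := by
      rw [PySem.List.slice_natCast]
      subst hcs
      rw [List.append_assoc, List.drop_left]
      simp only [List.length_append, Nat.add_sub_cancel_left]
      rw [List.append_assoc]
      exact List.take_left' rfl
    rw [h1]
    have h2 := ih (pre ++ t) rest cs E (by rw [hcs]; simp) (fun u hu => hne u (List.mem_cons_of_mem _ hu)) hE
    rw [h2]

-- ===== VERDICT (by name: the statement is the Claim_ definition above) =====
theorem parse_rna_string_py_spec : Claim_equal_parse_rna_string_py := by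
  intro sequence _
  unfold Spec_parse_rna_string_py parse_rna_string_py parse_rna_string_py_alt
  have hA := pvA_fold sequence.toList [] [] 0
  have hB := pvB_fold sequence.toList [] 0 0
  rw [pvBounds_eq_cum sequence.toList [] 0 0] at hB
  have hflat := pvTok_flatten sequence.toList [] 0
  have hne := pvTok_ne_nil sequence.toList [] 0
  rcases hT : pvTok sequence.toList [] 0 with ⟨toks, rest, dfin⟩
  rw [hT] at hA hB hflat hne
  simp only [List.nil_append, List.length_nil, Nat.cast_zero, sub_zero] at hA hB hflat hne
  dsimp only
  rw [hA, hB]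
  dsimp only
  have hlast : (PySem.List.pyGet? (pvCum 0 toks) (-1)).getD 0 = (toks.flatten.length : Int) := by
    rw [PySem.List.pyGet?_neg_one]
    simpa using pvCum_getLast toks 0
  have hlen : sequence.toList.length = toks.flatten.length + rest.length := by
    rw [← hflat]; simp
  have hcond : ((PySem.List.pyGet? (pvCum 0 toks) (-1)).getD 0 < PySem.List.len sequence.toList)
      ↔ rest ≠ [] := by
    rw [hlast, PySem.List.len_eq, hlen]
    constructor
    · intro h hnil
      rw [hnil] at h; simp at h
    · intro h
      have h0 : 0 < rest.length := List.length_pos_iff.mpr h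
      push_cast; omega
  have hS := pvSlices toks [] rest sequence.toList
      (if rest = [] then [] else [(sequence.toList.length : Int)])
      (by rw [← hflat]; simp) hne rfl
  simp only [List.length_nil, Nat.cast_zero] at hS
  by_cases hr : rest = []
  · rw [if_neg (show ¬rest ≠ [] by simp [hr])]
    rw [if_neg (fun h => (hcond.mp h) hr)]
    simp only [List.append_nil]
    simp only [hr, if_pos, List.append_nil] at hS
    rw [hS]
  · rw [if_pos hr, if_pos (hcond.mpr hr)]
    simp only [if_neg hr] at hS
    rw [PySem.List.len_eq]
    rw [hS]
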